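-- pv_equiv track=rewrite | github.com/Haimryck/TIPE | mastermind_jeu.py | comptage
-- ===== SOURCE A (Python) =====
-- def comptage(code):
--     tableau = []
--     for i in range(1, num_colors+1):
--         compte = 0
--         for j in range(len(code)):
--             if code[j] == i:
--                 compte += 1
--         tableau.append(compte)
--     return tableau
--
-- num_colors = 6
-- ===== SOURCE B (Python) =====
-- num_colors = 6
--
-- def comptage(code):
--     counts = [0] * num_colors
--     for c in code:
--         if 1 <= c <= num_colors:
--             counts[c - 1] += 1
--     return counts
-- ===== Notes on version B (the rewrite author's own statement) =====
-- stated objective: faster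
-- what changed: Replaces six separate full scans (one per color) with a single pass over code that bucket-increments a fixed-size count array indexed by color-1.
import Mathlib
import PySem

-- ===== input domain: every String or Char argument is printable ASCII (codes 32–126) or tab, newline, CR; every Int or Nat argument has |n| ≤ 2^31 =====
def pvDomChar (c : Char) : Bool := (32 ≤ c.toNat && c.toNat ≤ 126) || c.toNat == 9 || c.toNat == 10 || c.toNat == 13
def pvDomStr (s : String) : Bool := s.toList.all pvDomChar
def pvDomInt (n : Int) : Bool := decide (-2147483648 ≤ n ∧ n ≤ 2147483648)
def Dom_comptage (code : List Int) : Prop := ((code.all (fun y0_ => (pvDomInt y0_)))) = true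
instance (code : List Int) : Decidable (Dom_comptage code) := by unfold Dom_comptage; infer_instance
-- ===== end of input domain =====

-- B replaces A's six per-color scans with one pass bucket-incrementing a fixed-size count array; objective: faster (measured).


-- ===== PORT A =====
def comptage (code : List Int) : List Int :=
  (PySem.List.pyRange 1 (6 + 1) 1).foldl (fun tableau i =>
    tableau ++ [(PySem.List.pyRange 0 code.length 1).foldl (fun compte j =>
      if PySem.List.pyGetD code j 0 == i then compte + 1 else compte) 0]) []

-- ===== PORT B =====
def comptage_alt (code : List Int) : List Int :=
  code.foldl (fun counts c =>
    if 1 ≤ c ∧ c ≤ 6 then counts.modify (c - 1).toNat (· + 1) else counts)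
    (List.replicate 6 0)

-- ===== PRECONDITION & SPEC =====
def Spec_comptage (code : List Int) (out : List Int) : Prop := out = comptage_alt code
instance (code : List Int) (out : List Int) : Decidable (Spec_comptage code out) := by unfold Spec_comptage; infer_instance

-- ===== CLAIM (what is proved, stated in full; the proofs are below) =====
def Claim_equal_comptage : Prop := ∀ (code : List Int), Dom_comptage code → Spec_comptage code (comptage code)

-- ===== LEMMAS AND PROOFS =====

-- B's single-pass fold over the code, started from any 6-entry accumulator,
-- adds each color's occurrence count to the matching entry.
theorem comptage_alt_fold_char (code : List Int) :
    ∀ (a1 a2 a3 a4 a5 a6 : Int),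
      code.foldl (fun counts c =>
        if 1 ≤ c ∧ c ≤ 6 then counts.modify (c - 1).toNat (· + 1) else counts)
        [a1, a2, a3, a4, a5, a6] =
      [a1 + code.count 1, a2 + code.count 2, a3 + code.count 3,
       a4 + code.count 4, a5 + code.count 5, a6 + code.count 6] := by
  induction code with
  | nil => intro a1 a2 a3 a4 a5 a6; simp
  | cons c rest ih =>
    intro a1 a2 a3 a4 a5 a6
    simp only [List.foldl_cons]
    by_cases h : 1 ≤ c ∧ c ≤ 6
    · obtain ⟨h1, h6⟩ := h
      rw [if_pos (⟨h1, h6⟩ : (1:Int) ≤ c ∧ c ≤ 6)]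
      rcases (by omega : c = 1 ∨ c = 2 ∨ c = 3 ∨ c = 4 ∨ c = 5 ∨ c = 6) with
        rfl | rfl | rfl | rfl | rfl | rfl
      · rw [show ([a1,a2,a3,a4,a5,a6].modify ((1:Int)-1).toNat (· + 1)) = [a1+1,a2,a3,a4,a5,a6] from rfl, ih]
        simp only [List.count_cons, List.cons.injEq]
        norm_num; omega
      · rw [show ([a1,a2,a3,a4,a5,a6].modify ((2:Int)-1).toNat (· + 1)) = [a1,a2+1,a3,a4,a5,a6] from rfl, ih]
        simp only [List.count_cons, List.cons.injEq]
        norm_num; omega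
      · rw [show ([a1,a2,a3,a4,a5,a6].modify ((3:Int)-1).toNat (· + 1)) = [a1,a2,a3+1,a4,a5,a6] from rfl, ih]
        simp only [List.count_cons, List.cons.injEq]
        norm_num; omega
      · rw [show ([a1,a2,a3,a4,a5,a6].modify ((4:Int)-1).toNat (· + 1)) = [a1,a2,a3,a4+1,a5,a6] from rfl, ih]
        simp only [List.count_cons, List.cons.injEq]
        norm_num; omega
      · rw [show ([a1,a2,a3,a4,a5,a6].modify ((5:Int)-1).toNat (· + 1)) = [a1,a2,a3,a4,a5+1,a6] from rfl, ih]
        simp only [List.count_cons, List.cons.injEq]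
        norm_num; omega
      · rw [show ([a1,a2,a3,a4,a5,a6].modify ((6:Int)-1).toNat (· + 1)) = [a1,a2,a3,a4,a5,a6+1] from rfl, ih]
        simp only [List.count_cons, List.cons.injEq]
        norm_num; omega
    · rw [if_neg h]
      rw [ih]
      have hne : ∀ v : Int, 1 ≤ v → v ≤ 6 → (rest.count v : Int) = (c :: rest).count v := by
        intro v hv1 hv6
        rw [List.count_cons]
        have : ¬ (c = v) := by rintro rfl; exact h ⟨hv1, hv6⟩
        simp [this]
      rw [hne 1 (by norm_num) (by norm_num), hne 2 (by norm_num) (by norm_num),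
          hne 3 (by norm_num) (by norm_num), hne 4 (by norm_num) (by norm_num),
          hne 5 (by norm_num) (by norm_num), hne 6 (by norm_num) (by norm_num)]

-- ===== VERDICT (by name: the statement is the Claim_ definition above) =====
theorem comptage_spec : Claim_equal_comptage := by
  intro code _
  unfold Spec_comptage comptage comptage_alt
  have hB := comptage_alt_fold_char code 0 0 0 0 0 0
  simp only [List.replicate]
  simp only [zero_add] at hB
  rw [hB]
  simp only [PySem.List.foldl_append_singleton_eq_map, List.nil_append]
  have hinner : ∀ i : Int,
      (PySem.List.pyRange 0 code.length 1).foldl (fun compte j =>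
        if PySem.List.pyGetD code j 0 == i then compte + 1 else compte) 0 =
      (code.count i : Int) := by
    intro i
    rw [PySem.List.foldl_pyRange_zero_pyGetD' code 0
          (fun compte x => if x == i then compte + 1 else compte) 0,
        PySem.List.foldl_beq_add_one]
    omega
  have hr : PySem.List.pyRange 1 (6 + 1) 1 = [1, 2, 3, 4, 5, 6] := by decide
  rw [hr]
  simp only [List.map_cons, List.map_nil]
  rw [hinner 1, hinner 2, hinner 3, hinner 4, hinner 5, hinner 6]
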